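-- pv_equiv track=rewrite | github.com/ilellosmith/python_practice | edX/intro_python/finger_exercises/unit_06/sort_list.py | newSort
-- ===== SOURCE A (Python) =====
-- def newSort(L):
--     """ L, list with unique elements """
--     iter_outer = 0
--     iter_inner = 0
--     for i in range(len(L) - 1):
--         iter_outer += 1
--         j=i+1
--         while j < len(L):
--             iter_inner += 1
--             if L[i] > L[j]:
--                 temp = L[i]
--                 L[i] = L[j]
--                 L[j] = temp
--             j += 1
--     return(L, iter_outer, iter_inner)
-- ===== SOURCE B (Python) =====
-- def newSort(L):
--     """ L, list with unique elements """
--     n = len(L)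
--     return (sorted(L), max(0, n - 1), n * (n - 1) // 2)
-- ===== Notes on version B (the rewrite author's own statement) =====
-- stated objective: faster
-- what changed: Replaces the O(n^2) selection-sort double loop with sorted(L) and closed-form iteration counts n-1 and n(n-1)/2.
import Mathlib
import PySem

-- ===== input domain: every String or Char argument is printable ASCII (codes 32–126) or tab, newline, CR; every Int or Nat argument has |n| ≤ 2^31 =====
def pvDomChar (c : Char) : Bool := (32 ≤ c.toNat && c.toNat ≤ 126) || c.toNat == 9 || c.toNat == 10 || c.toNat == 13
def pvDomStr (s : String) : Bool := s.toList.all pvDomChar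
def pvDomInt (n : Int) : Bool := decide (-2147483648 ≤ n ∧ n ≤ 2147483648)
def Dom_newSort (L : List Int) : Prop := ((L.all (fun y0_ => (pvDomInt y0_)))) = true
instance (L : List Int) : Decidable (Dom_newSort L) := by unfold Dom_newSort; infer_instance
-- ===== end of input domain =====

-- B replaces A's O(n^2) selection-sort double loop by a library sort plus closed-form
-- iteration counts (equivalence is about the RETURN value only: Python A sorts L in place, B does not).


-- ===== PORT A =====
-- inner 'while j < len(L)' loop; state = (list, iter_inner)
def innerA (L : List Int) (i j : Nat) (cnt : Int) : List Int × Int :=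
  if h : j < L.length then
    innerA (if L.getD i 0 > L.getD j 0
            then (L.set i (L.getD j 0)).set j (L.getD i 0)
            else L) i (j + 1) (cnt + 1)
  else (L, cnt)
termination_by L.length - j
decreasing_by split <;> (try simp only [List.length_set]) <;> omega

-- body of 'for i in range(len(L) - 1)'
def outerStep (st : List Int × Int × Int) (i : Nat) : List Int × Int × Int :=
  let r := innerA st.1 i (i + 1) st.2.2
  (r.1, st.2.1 + 1, r.2)

def newSort (L : List Int) : List Int × Int × Int :=
  (List.range (L.length - 1)).foldl outerStep (L, 0, 0)

-- ===== PORT B =====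
def newSort_alt (L : List Int) : List Int × Int × Int :=
  ((PySem.List.sorted L (fun x => x) false),
   max 0 ((L.length : Int) - 1),
   PySem.Int.floordiv ((L.length : Int) * ((L.length : Int) - 1)) 2)

-- ===== PRECONDITION & SPEC =====
def Spec_newSort (L : List Int) (out : List Int × Int × Int) : Prop := out = newSort_alt L
instance (L : List Int) (out : List Int × Int × Int) : Decidable (Spec_newSort L out) := by unfold Spec_newSort; infer_instance

-- ===== CLAIM (what is proved, stated in full; the proofs are below) =====
def Claim_equal_newSort : Prop := ∀ (L : List Int), Dom_newSort L → Spec_newSort L (newSort L)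

-- ===== LEMMAS AND PROOFS =====

-- postcondition of the inner pass: count, untouched positions, permutation of the touched
-- suffix, minimality at position i
lemma pvGetDSetSelf (l : List Int) (i : Nat) (a : Int) (h : i < l.length) :
    (l.set i a).getD i 0 = a := by
  simp [List.getD_eq_getElem?_getD, List.getElem?_set_self h]

lemma pvGetDSetNe (l : List Int) (i j : Nat) (a : Int) (h : i ≠ j) :
    (l.set i a).getD j 0 = l.getD j 0 := by
  simp [List.getD_eq_getElem?_getD, List.getElem?_set_ne h]

lemma innerA_spec (k : Nat) : ∀ (L : List Int) (i j : Nat) (c : Int),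
    L.length - j = k → i < j →
    (innerA L i j c).2 = c + ((L.length - j : Nat) : Int) ∧
    (innerA L i j c).1.length = L.length ∧
    (∀ p, p < j → p ≠ i → (innerA L i j c).1.getD p 0 = L.getD p 0) ∧
    ((innerA L i j c).1.getD i 0 :: (innerA L i j c).1.drop j).Perm
      (L.getD i 0 :: L.drop j) ∧
    (∀ p, j ≤ p → p < L.length → (innerA L i j c).1.getD i 0 ≤ (innerA L i j c).1.getD p 0) ∧
    (innerA L i j c).1.getD i 0 ≤ L.getD i 0 := by
  induction k with
  | zero =>
    intro L i j c hk hij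
    have hj : ¬ j < L.length := by omega
    rw [innerA, dif_neg hj]
    refine ⟨by simp [hk], rfl, fun p _ _ => rfl, List.Perm.refl _,
      fun p hp1 hp2 => by omega, le_refl _⟩
  | succ k ih =>
    intro L i j c hk hij
    have hj : j < L.length := by omega
    have hij' : i < L.length := lt_trans hij hj
    rw [innerA, dif_pos hj]
    set Li := L.getD i 0 with hLi
    set Lj := L.getD j 0 with hLj
    set L' := if Li > Lj then (L.set i Lj).set j Li else L with hL'
    have hne : i ≠ j := Nat.ne_of_lt hij
    have hlen' : L'.length = L.length := by rw [hL']; split <;> simp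
    have f2 : ∀ p, p ≠ i → p ≠ j → L'.getD p 0 = L.getD p 0 := by
      intro p hpi hpj
      rw [hL']; split
      · rw [pvGetDSetNe _ _ _ _ (fun h => hpj h.symm), pvGetDSetNe _ _ _ _ (fun h => hpi h.symm)]
      · rfl
    have fi : L'.getD i 0 = if Li > Lj then Lj else Li := by
      rw [hL']; split
      · rw [pvGetDSetNe _ _ _ _ (Ne.symm hne), pvGetDSetSelf _ _ _ hij']
      · rfl
    have fj : L'.getD j 0 = if Li > Lj then Li else Lj := by
      rw [hL']; split
      · rw [pvGetDSetSelf _ _ _ (by simp [hj])]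
      · rfl
    have f3 : L'.getD i 0 ≤ L'.getD j 0 := by
      rw [fi, fj]; split_ifs with h <;> omega
    have f6 : L'.getD i 0 ≤ Li := by rw [fi]; split_ifs with h <;> omega
    have f5 : L'.drop (j + 1) = L.drop (j + 1) := by
      rw [hL']; split
      · rw [List.drop_set, List.drop_set, if_pos (by omega), if_pos (by omega)]
      · rfl
    have f4 : (L'.getD i 0 :: L'.getD j 0 :: L.drop (j + 1)).Perm
        (Li :: Lj :: L.drop (j + 1)) := by
      rw [fi, fj]; split_ifs with h
      · exact List.Perm.swap _ _ _
      · exact List.Perm.refl _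
    obtain ⟨r1, r2, r3, r4, r5, r6⟩ :=
      ih L' i (j + 1) (c + 1) (by rw [hlen']; omega) (by omega)
    set R := (innerA L' i (j + 1) (c + 1)).1 with hR
    have hRlen : R.length = L.length := r2.trans hlen'
    refine ⟨?_, hRlen, ?_, ?_, ?_, le_trans r6 f6⟩
    · rw [r1, hlen']; omega
    · intro p hp hpi
      rw [r3 p (by omega) hpi, f2 p hpi (by omega)]
    · have hRj : R.getD j 0 = L'.getD j 0 := r3 j (by omega) (Ne.symm hne)
      have hdropR : R.drop j = R.getD j 0 :: R.drop (j + 1) := by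
        have h1 : R.getD j 0 = R[j]'(by omega) := List.getD_eq_getElem _ _ (by omega)
        rw [h1]; exact List.drop_eq_getElem_cons (by omega)
      have hdropL : L.drop j = Lj :: L.drop (j + 1) := by
        have h1 : Lj = L[j] := List.getD_eq_getElem _ _ hj
        rw [h1]; exact List.drop_eq_getElem_cons hj
      rw [hdropR, hRj, hdropL]
      exact (List.Perm.swap _ _ _).trans ((List.Perm.cons _ r4).trans
        ((List.Perm.swap _ _ _).trans (by rw [f5]; exact f4)))
    · intro p hp1 hp2
      rcases eq_or_lt_of_le hp1 with h | h
      · rw [← h, r3 j (by omega) (Ne.symm hne)]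
        exact le_trans r6 f3
      · exact r5 p (by omega) (by omega)


-- invariant of the outer loop after m passes
lemma outer_spec (L : List Int) : ∀ m : Nat, m ≤ L.length - 1 →
    ∃ M T, (List.range m).foldl outerStep (L, 0, 0) = (M, (m : Int), T) ∧
      M.length = L.length ∧ M.Perm L ∧
      (∀ a b, a < m → a ≤ b → b < M.length → M.getD a 0 ≤ M.getD b 0) ∧
      2 * T = (m : Int) * (2 * (L.length : Int) - (m : Int) - 1) := by
  intro m
  induction m with
  | zero =>
    intro _
    exact ⟨L, 0, rfl, rfl, List.Perm.refl _, fun a b ha _ _ => by omega, by ring⟩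
  | succ m ih =>
    intro hm
    obtain ⟨M, T, hfold, hlen, hperm, hsort, hT⟩ := ih (by omega)
    rw [List.range_succ, List.foldl_append, hfold, List.foldl_cons, List.foldl_nil]
    obtain ⟨r1, r2, r3, r4, r5, r6⟩ :=
      innerA_spec (M.length - (m + 1)) M m (m + 1) T rfl (by omega)
    set R := (innerA M m (m + 1) T).1 with hR
    have hRlen : R.length = L.length := r2.trans hlen
    have hdropRM : (R.drop m).Perm (M.drop m) := by
      by_cases hmlt : m < M.length
      · have h1 : R.getD m 0 = R[m]'(by omega) := List.getD_eq_getElem _ _ (by omega)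
        have h2 : M.getD m 0 = M[m] := List.getD_eq_getElem _ _ hmlt
        have hdR : R.drop m = R.getD m 0 :: R.drop (m + 1) := by
          rw [h1]; exact List.drop_eq_getElem_cons (by omega)
        have hdM : M.drop m = M.getD m 0 :: M.drop (m + 1) := by
          rw [h2]; exact List.drop_eq_getElem_cons hmlt
        rw [hdR, hdM]; exact r4
      · rw [List.drop_eq_nil_of_le (by omega), List.drop_eq_nil_of_le (by omega)]
    have htake : R.take m = M.take m := by
      apply List.ext_getElem
      · simp [hRlen, hlen]
      · intro p h1 h2
        simp only [List.getElem_take]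
        rw [← List.getD_eq_getElem _ 0, ← List.getD_eq_getElem _ 0]
        exact r3 p (by simp at h1; omega) (by simp at h1; omega)
    have hpermRM : R.Perm M := by
      rw [← List.take_append_drop m R, ← List.take_append_drop m M]
      exact List.Perm.append (htake ▸ List.Perm.refl _) hdropRM
    have hsuffix : ∀ b, m ≤ b → b < R.length →
        ∃ p, m ≤ p ∧ p < M.length ∧ R.getD b 0 = M.getD p 0 := by
      intro b hb1 hb2
      have hmem : R.getD b 0 ∈ R.drop m := by
        rw [List.getD_eq_getElem _ _ hb2]
        have : R[b] = (R.drop m)[b - m]'(by simp; omega) := by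
          rw [List.getElem_drop]; congr 1; omega
        rw [this]; exact List.getElem_mem _
      have hmem' : R.getD b 0 ∈ M.drop m := hdropRM.mem_iff.mp hmem
      obtain ⟨q, hq, hqe⟩ := List.mem_iff_getElem.mp hmem'
      refine ⟨m + q, by omega, by simp at hq; omega, ?_⟩
      rw [← hqe, List.getElem_drop, List.getD_eq_getElem _ _ (by simp at hq; omega)]
    refine ⟨R, (innerA M m (m + 1) T).2, ?_, hRlen, hpermRM.trans hperm, ?_, ?_⟩
    · simp only [outerStep]; rw [hR]; push_cast; rfl
    · intro a b ha hab hbl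
      by_cases ham : a < m
      · have hra : R.getD a 0 = M.getD a 0 := r3 a (by omega) (by omega)
        by_cases hbm : b < m
        · rw [hra, r3 b (by omega) (by omega)]
          exact hsort a b ham hab (by omega)
        · obtain ⟨p, hp1, hp2, hp3⟩ := hsuffix b (by omega) hbl
          rw [hra, hp3]
          exact hsort a p ham (by omega) hp2
      · have ham' : a = m := by omega
        subst ham'
        rcases eq_or_lt_of_le hab with h | h
        · subst h; exact le_refl _
        · exact r5 b (by omega) (by omega)
    · have hc : ((M.length - (m + 1) : Nat) : Int) = (L.length : Int) - (m : Int) - 1 := by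
        rw [hlen]; omega
      rw [r1, hc]
      push_cast
      linear_combination hT


-- ===== VERDICT (by name: the statement is the Claim_ definition above) =====
theorem newSort_spec : Claim_equal_newSort := by
  intro L _
  unfold Spec_newSort newSort newSort_alt
  obtain ⟨M, T, hfold, hlen, hperm, hsort, hT⟩ := outer_spec L (L.length - 1) le_rfl
  rw [hfold]
  have hpw : M.Pairwise (· ≤ ·) := by
    rw [List.pairwise_iff_getElem]
    intro a b ha hb hab
    have h1 : M.getD a 0 ≤ M.getD b 0 := by
      apply hsort a b ?_ (le_of_lt hab) hb
      omega
    rwa [List.getD_eq_getElem _ _ ha, List.getD_eq_getElem _ _ hb] at h1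
  have hs : PySem.List.sorted L (fun x => x) false = M :=
    PySem.List.sorted_id_eq_of_perm_of_pairwise L M hperm hpw
  have hio : ((L.length - 1 : Nat) : Int) = max 0 ((L.length : Int) - 1) := by omega
  have hfd : PySem.Int.floordiv ((L.length : Int) * ((L.length : Int) - 1)) 2
      = ((L.length : Int) * ((L.length : Int) - 1)) / 2 :=
    PySem.Int.floordiv_eq_ediv_of_pos (by norm_num)
  have h2T : 2 * T = (L.length : Int) * ((L.length : Int) - 1) := by
    rcases Nat.eq_zero_or_pos L.length with h0 | h0
    · simp [h0] at hT ⊢; omega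
    · have : ((L.length - 1 : Nat) : Int) = (L.length : Int) - 1 := by omega
      rw [this] at hT
      rw [hT]; ring
  have hTval : T = PySem.Int.floordiv ((L.length : Int) * ((L.length : Int) - 1)) 2 := by
    rw [hfd]
    set a := (L.length : Int) * ((L.length : Int) - 1) with ha
    omega
  rw [hs, hio, hTval]
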